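-- pv_equiv track=rewrite | github.com/bundlewrap/bundlewrap | bundlewrap/utils/text.py | toml_clean
-- ===== SOURCE A (Python) =====
-- def toml_clean(s):
--     """
--     Removes duplicate sections from TOML, e.g.:
--
--         [foo]     <--- this line will be removed since it's redundant
--         [foo.bar]
--         baz = 1
--     """
--     lines = list(s.splitlines())
--     result = []
--     previous = ""
--     for line in lines.copy():
--         if line.startswith("[") and line.endswith("]"):
--             if line[1:].startswith(previous + "."):
--                 result.pop()
--             previous = line[1:-1]
--         else:
--             previous = ""
--         result.append(line)
--     return "\n".join(result) + "\n"
-- ===== SOURCE B (Python) =====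
-- def _dropped(line, nxt):
--     if nxt is None:
--         return False
--     if not (nxt.startswith("[") and nxt.endswith("]")):
--         return False
--     prev = line[1:-1] if (line.startswith("[") and line.endswith("]")) else ""
--     return nxt[1:].startswith(prev + ".")
--
--
-- def toml_clean(s):
--     lines = s.splitlines()
--     nexts = lines[1:] + [None]
--     kept = [line for line, nxt in zip(lines, nexts) if not _dropped(line, nxt)]
--     return "\n".join(kept) + "\n"
-- ===== Notes on version B (the rewrite author's own statement) =====
-- stated objective: alternative
-- what changed: Replaces A's append-then-pop backtracking loop with carried state by a stateless one-pass forward filter: each line is paired with its successor and kept unless the successor is a header that extends it, so result.pop() and the carried last-header-name disappear.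
import Mathlib
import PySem

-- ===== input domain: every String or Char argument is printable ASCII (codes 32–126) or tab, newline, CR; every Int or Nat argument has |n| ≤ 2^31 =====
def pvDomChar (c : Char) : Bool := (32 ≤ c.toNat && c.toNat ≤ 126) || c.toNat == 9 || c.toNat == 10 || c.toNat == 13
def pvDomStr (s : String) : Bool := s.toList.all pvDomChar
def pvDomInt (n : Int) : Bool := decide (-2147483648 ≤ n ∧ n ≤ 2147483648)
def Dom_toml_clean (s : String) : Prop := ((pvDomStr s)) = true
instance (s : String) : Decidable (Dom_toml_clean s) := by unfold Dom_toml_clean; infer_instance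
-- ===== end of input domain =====

-- B drops each header line whose successor is a header extending it (one-step lookahead filter),
-- instead of A's append-then-pop loop; equal return values on Pre_ (where A does not raise).

-- ===== PORT A =====
-- Python's result.pop() raises IndexError on an empty result (only reachable at the first line);
-- those inputs are excluded by Pre_toml_clean, so dropLast is exact on the admitted domain.
def toml_clean (s : String) : String :=
  let lines := PySem.Str.splitlines s
  let st := lines.foldl
    (fun (acc : List String × String) line =>
      let result := acc.1
      let previous := acc.2
      if PySem.Str.startswith line "[" && PySem.Str.endswith line "]" then
        let result := if PySem.Str.startswith (PySem.Str.slice line (some 1) none) (previous ++ ".")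
                      then result.dropLast else result
        (result ++ [line], PySem.Str.slice line (some 1) (some (-1)))
      else
        (result ++ [line], ""))
    ([], "")
  PySem.Str.join "\n" st.1 ++ "\n"

-- ===== PORT B =====
def tcDropped (line : String) (nxt? : Option String) : Bool :=
  match nxt? with
  | none => false
  | some nxt =>
    if PySem.Str.startswith nxt "[" && PySem.Str.endswith nxt "]" then
      let prev := if PySem.Str.startswith line "[" && PySem.Str.endswith line "]"
                  then PySem.Str.slice line (some 1) (some (-1)) else ""
      PySem.Str.startswith (PySem.Str.slice nxt (some 1) none) (prev ++ ".")
    else false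

def toml_clean_alt (s : String) : String :=
  let lines := PySem.Str.splitlines s
  let nexts := (lines.drop 1).map some ++ [none]
  let kept := ((lines.zip nexts).filter (fun p => !tcDropped p.1 p.2)).map Prod.fst
  PySem.Str.join "\n" kept ++ "\n"

-- ===== PRECONDITION & SPEC =====
-- Python A raises IndexError (pop from an empty result) exactly when the FIRST line is a
-- "[...]" header whose inner text starts with "."; Pre_ excludes exactly those inputs.
def tcRaiseCond (l : String) : Bool :=
  PySem.Str.startswith l "[" && PySem.Str.endswith l "]" &&
    PySem.Str.startswith (PySem.Str.slice l (some 1) none) "."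

def Pre_toml_clean (s : String) : Prop :=
  ¬ tcRaiseCond ((PySem.Str.splitlines s).headD "") = true
instance (s : String) : Decidable (Pre_toml_clean s) := by unfold Pre_toml_clean; infer_instance

def pvWitness_toml_clean : String := "[foo]\n[foo.bar]\nbaz = 1"

def Spec_toml_clean (s : String) (out : String) : Prop := out = toml_clean_alt s
instance (s : String) (out : String) : Decidable (Spec_toml_clean s out) := by unfold Spec_toml_clean; infer_instance

-- ===== CLAIM (what is proved, stated in full; the proofs are below) =====
def Claim_equal_toml_clean : Prop := ∀ (s : String), Dom_toml_clean s → Pre_toml_clean s → Spec_toml_clean s (toml_clean s)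

-- ===== LEMMAS AND PROOFS =====

-- shorthand for A's loop body
def tcStep (acc : List String × String) (line : String) : List String × String :=
  if PySem.Str.startswith line "[" && PySem.Str.endswith line "]" then
    ((if PySem.Str.startswith (PySem.Str.slice line (some 1) none) (acc.2 ++ ".")
      then acc.1.dropLast else acc.1) ++ [line],
     PySem.Str.slice line (some 1) (some (-1)))
  else (acc.1 ++ [line], "")

def tcPrevOf (l : String) : String :=
  if PySem.Str.startswith l "[" && PySem.Str.endswith l "]"
  then PySem.Str.slice l (some 1) (some (-1)) else ""

-- recursive characterisation of B's filter
def tcKeep : List String → List String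
  | [] => []
  | [l] => [l]
  | l :: n :: ls => (if tcDropped l (some n) then [] else [l]) ++ tcKeep (n :: ls)

lemma tcDropped_some (l n : String) :
    tcDropped l (some n)
      = ((PySem.Str.startswith n "[" && PySem.Str.endswith n "]")
          && PySem.Str.startswith (PySem.Str.slice n (some 1) none) (tcPrevOf l ++ ".")) := by
  simp only [tcDropped, tcPrevOf]
  by_cases h : (PySem.Str.startswith n "[" && PySem.Str.endswith n "]") = true <;> simp [h]

lemma tcFilter_eq_keep (ls : List String) :
    ((ls.zip ((ls.drop 1).map some ++ [none])).filter (fun p => !tcDropped p.1 p.2)).map Prod.fst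
      = tcKeep ls := by
  induction ls using tcKeep.induct with
  | case1 => simp [tcKeep]
  | case2 l => simp [tcKeep, tcDropped]
  | case3 l n ls ih =>
    simp only [List.drop, List.map, List.zip, tcKeep]
    by_cases h : tcDropped l (some n) = true <;>
      simp [h, List.filter] <;> simpa using ih

lemma tcLoop_eq (ls : List String) : ∀ (res : List String) (x : String),
    (List.foldl tcStep (res ++ [x], tcPrevOf x) ls).1 = res ++ tcKeep (x :: ls) := by
  induction ls with
  | nil => intro res x; simp [tcKeep]
  | cons n ls ih =>
    intro res x
    rw [List.foldl_cons]
    by_cases hh : (PySem.Str.startswith n "[" && PySem.Str.endswith n "]") = true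
    · by_cases hp : PySem.Str.startswith (PySem.Str.slice n (some 1) none) (tcPrevOf x ++ ".") = true
      · have hpn : tcPrevOf n = PySem.Str.slice n (some 1) (some (-1)) := by
          unfold tcPrevOf; rw [if_pos hh]
        have hst : tcStep (res ++ [x], tcPrevOf x) n = (res ++ [n], tcPrevOf n) := by
          unfold tcStep
          simp only [hh, hp, if_true, List.dropLast_concat, hpn]
        have hd : tcDropped x (some n) = true := by
          rw [tcDropped_some, hh, hp]; rfl
        rw [hst, ih res n]
        simp only [tcKeep, hd, if_true, List.nil_append]
      · have hpn : tcPrevOf n = PySem.Str.slice n (some 1) (some (-1)) := by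
          unfold tcPrevOf; rw [if_pos hh]
        have hst : tcStep (res ++ [x], tcPrevOf x) n = ((res ++ [x]) ++ [n], tcPrevOf n) := by
          unfold tcStep
          simp only [hh, if_true, hpn]
          rw [if_neg hp]
        have hd : tcDropped x (some n) = false := by
          rw [tcDropped_some, hh]
          simp only [Bool.true_and]
          exact Bool.eq_false_iff.mpr hp
        rw [hst, ih (res ++ [x]) n]
        simp only [tcKeep, hd, Bool.false_eq_true, if_false, List.append_assoc, List.singleton_append]
    · have hpn : tcPrevOf n = "" := by unfold tcPrevOf; rw [if_neg hh]
      have hst : tcStep (res ++ [x], tcPrevOf x) n = ((res ++ [x]) ++ [n], tcPrevOf n) := by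
        unfold tcStep
        rw [if_neg hh, hpn]
      have hd : tcDropped x (some n) = false := by
        rw [tcDropped_some]
        cases hb : (PySem.Str.startswith n "[" && PySem.Str.endswith n "]") with
        | false => rfl
        | true => exact absurd hb hh
      rw [hst, ih (res ++ [x]) n]
      simp only [tcKeep, hd, Bool.false_eq_true, if_false, List.append_assoc, List.singleton_append]

lemma toml_clean_fold_eq (s : String) (hpre : Pre_toml_clean s) :
    (List.foldl tcStep ([], "") (PySem.Str.splitlines s)).1
      = tcKeep (PySem.Str.splitlines s) := by
  rcases hls : PySem.Str.splitlines s with _ | ⟨x, ls⟩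
  · simp [tcKeep]
  · have hpre' : ¬ tcRaiseCond x = true := by
      unfold Pre_toml_clean at hpre; rw [hls] at hpre; simpa using hpre
    have hdot : ("" ++ "." : String) = "." := by decide
    have hstep0 : tcStep ([], "") x = (([] : List String) ++ [x], tcPrevOf x) := by
      unfold tcStep tcPrevOf
      by_cases hh : (PySem.Str.startswith x "[" && PySem.Str.endswith x "]") = true
      · have hp : PySem.Str.startswith (PySem.Str.slice x (some 1) none) ("" ++ ".") = false := by
          cases hcv : PySem.Str.startswith (PySem.Str.slice x (some 1) none) "." with
          | false => rw [hdot]; exact hcv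
          | true => exact absurd (show tcRaiseCond x = true by unfold tcRaiseCond; rw [hh, hcv]; rfl) hpre'
        simp only [hh, hp, if_true, Bool.false_eq_true, if_false]
      · simp only [if_neg hh]
    rw [List.foldl_cons, hstep0, tcLoop_eq ls [] x]
    simp

-- ===== VERDICT (by name: the statement is the Claim_ definition above) =====
theorem toml_clean_spec : Claim_equal_toml_clean := by
  intro s _hdom hpre
  unfold Spec_toml_clean toml_clean toml_clean_alt
  dsimp only
  rw [tcFilter_eq_keep]
  have h := toml_clean_fold_eq s hpre
  have hfold : (List.foldl tcStep ([], "") (PySem.Str.splitlines s)) =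
      (PySem.Str.splitlines s).foldl
        (fun (acc : List String × String) line =>
          let result := acc.1
          let previous := acc.2
          if PySem.Str.startswith line "[" && PySem.Str.endswith line "]" then
            let result := if PySem.Str.startswith (PySem.Str.slice line (some 1) none) (previous ++ ".")
                          then result.dropLast else result
            (result ++ [line], PySem.Str.slice line (some 1) (some (-1)))
          else
            (result ++ [line], "")) ([], "") := rfl
  rw [← hfold, h]
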